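-- pv_equiv track=rewrite | github.com/Abdullah-Khan-Sherwani/BlackboxRAG | src/retrieval/hybrid.py | _chunk_maps
-- ===== SOURCE A (Python) =====
-- def _chunk_maps(chunks):
--     """Build quick lookup maps for neighbor context enrichment."""
--     by_doc = {}
--     for c in chunks:
--         key = c.get("ntsb_no") or c.get("report_id", "")
--         if key:
--             by_doc.setdefault(key, []).append(c)
--
--     for key, doc_chunks in by_doc.items():
--         doc_chunks.sort(key=lambda x: x.get("chunk_id", ""))
--         by_doc[key] = doc_chunks
--
--     return by_doc
-- ===== SOURCE B (Python) =====
-- def _chunk_maps(chunks):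
--     """Build quick lookup maps for neighbor context enrichment."""
--     def doc_key(c):
--         return c.get("ntsb_no") or c.get("report_id", "")
--
--     # distinct doc keys in first-appearance order (falsy keys skipped)
--     keys = []
--     seen = set()
--     for c in chunks:
--         k = doc_key(c)
--         if k and k not in seen:
--             seen.add(k)
--             keys.append(k)
--
--     by_doc = {k: [] for k in keys}
--
--     # one global stable sort, then distribute into the pre-seeded groups
--     for c in sorted(chunks, key=lambda x: x.get("chunk_id", "")):
--         k = doc_key(c)
--         if k:
--             by_doc[k].append(c)
--
--     return by_doc
-- ===== Notes on version B (the rewrite author's own statement) =====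
-- stated objective: alternative
-- what changed: A groups chunks first and then sorts each group separately; B records the distinct doc keys in first-appearance order, sorts the whole chunk list once (stably, by chunk_id), and distributes the sorted chunks into pre-seeded groups.
import Mathlib
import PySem

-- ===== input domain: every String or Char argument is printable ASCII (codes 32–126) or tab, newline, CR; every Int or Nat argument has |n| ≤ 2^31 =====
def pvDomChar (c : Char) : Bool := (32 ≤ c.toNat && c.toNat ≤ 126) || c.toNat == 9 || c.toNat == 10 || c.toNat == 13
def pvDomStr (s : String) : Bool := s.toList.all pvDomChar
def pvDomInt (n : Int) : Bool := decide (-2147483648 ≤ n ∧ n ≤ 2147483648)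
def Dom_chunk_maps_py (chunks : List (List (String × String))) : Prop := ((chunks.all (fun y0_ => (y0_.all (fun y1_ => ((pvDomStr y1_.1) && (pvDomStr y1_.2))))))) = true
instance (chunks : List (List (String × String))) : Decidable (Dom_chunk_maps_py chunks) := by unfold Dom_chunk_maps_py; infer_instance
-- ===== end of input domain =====

-- B groups by one global stable sort plus a pre-seeded key order instead of A's group-then-sort-each-group; the return values are proved equal.

-- shared helpers: a chunk is a Python dict rendered as an assoc list (lookup = first match)
def pvGet (c : List (String × String)) (k : String) : Option String :=
  (PySem.Dict.mk c).get? k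

-- key = c.get("ntsb_no") or c.get("report_id", "")   (None and "" are falsy)
def pvKeyOf (c : List (String × String)) : String :=
  match pvGet c "ntsb_no" with
  | some s => if s = "" then (pvGet c "report_id").getD "" else s
  | none => (pvGet c "report_id").getD ""

-- x.get("chunk_id", "")
def pvChunkId (c : List (String × String)) : String :=
  (pvGet c "chunk_id").getD ""

-- ===== PORT A =====
-- by_doc.setdefault(key, []).append(c) mutates the stored list in place: exactly d.modify key [] (· ++ [c]).
-- The second loop sorts each value in place and reassigns (overwrite keeps position): items.map over the values.
def chunk_maps_py (chunks : List (List (String × String))) : List (String × List (List (String × String))) :=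
  let by_doc := chunks.foldl
    (fun d c =>
      let key := pvKeyOf c
      if key ≠ "" then d.modify key [] (fun l => l ++ [c]) else d)
    PySem.Dict.empty
  by_doc.items.map (fun p => (p.1, PySem.List.sorted p.2 pvChunkId false))

-- ===== PORT B =====
-- keys: the distinct truthy doc keys in first-appearance order (the seen-set loop = PySem.Set.ofList of the
-- filtered key list); then one global stable sort by chunk_id and a distribution pass appending into the
-- pre-seeded dict (by_doc[k].append(c) on a key guaranteed present: d.modify k [] (· ++ [c])).
def chunk_maps_py_alt (chunks : List (List (String × String))) : List (String × List (List (String × String))) :=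
  let keys := PySem.Set.ofList ((chunks.map pvKeyOf).filter (fun k => decide (k ≠ "")))
  let seeded := keys.foldl
    (fun d k => d.insert k ([] : List (List (String × String)))) PySem.Dict.empty
  let filled := (PySem.List.sorted chunks pvChunkId false).foldl
    (fun d c =>
      let k := pvKeyOf c
      if k ≠ "" then d.modify k [] (fun l => l ++ [c]) else d)
    seeded
  filled.items

-- ===== PRECONDITION & SPEC =====
def Spec_chunk_maps_py (chunks : List (List (String × String))) (out : List (String × List (List (String × String)))) : Prop := out = chunk_maps_py_alt chunks
instance (chunks : List (List (String × String))) (out : List (String × List (List (String × String)))) : Decidable (Spec_chunk_maps_py chunks out) := by unfold Spec_chunk_maps_py; infer_instance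

-- ===== CLAIM (what is proved, stated in full; the proofs are below) =====
def Claim_equal_chunk_maps_py : Prop := ∀ (chunks : List (List (String × String))), Dom_chunk_maps_py chunks → Spec_chunk_maps_py chunks (chunk_maps_py chunks)

-- ===== LEMMAS AND PROOFS =====

-- the distribution loop both ports fold (A over chunks, B over the sorted chunks)
def pvFill (d : PySem.Dict String (List (List (String × String)))) (xs : List (List (String × String))) : PySem.Dict String (List (List (String × String))) :=
  xs.foldl
    (fun d c =>
      let k := pvKeyOf c
      if k ≠ "" then d.modify k [] (fun l => l ++ [c]) else d)
    d

def pvCond (c : List (String × String)) : Bool := decide (pvKeyOf c ≠ "")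

theorem pvFill_eq_filter (xs : List (List (String × String))) (d : PySem.Dict String (List (List (String × String)))) :
    pvFill d xs = (xs.filter pvCond).foldl
      (fun d c => d.modify (pvKeyOf c) [] (fun l => l ++ [c])) d := by
  induction xs generalizing d with
  | nil => rfl
  | cons x xs ih =>
      by_cases h : pvKeyOf x = ""
      · have h1 : pvFill d (x :: xs) = pvFill d xs := by simp [pvFill, h]
        have h2 : List.filter pvCond (x :: xs) = List.filter pvCond xs := by simp [pvCond, h]
        rw [h1, h2, ih]
      · have h1 : pvFill d (x :: xs) = pvFill (d.modify (pvKeyOf x) [] (fun l => l ++ [x])) xs := by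
          simp [pvFill, h]
        have h2 : List.filter pvCond (x :: xs) = x :: List.filter pvCond xs := by simp [pvCond, h]
        rw [h1, h2, ih, List.foldl_cons]

theorem pvFill_keys (xs : List (List (String × String))) (d : PySem.Dict String (List (List (String × String)))) :
    (pvFill d xs).keys = PySem.Set.update d.keys ((xs.filter pvCond).map pvKeyOf) := by
  rw [pvFill_eq_filter]
  exact PySem.Dict.keys_foldl_modify_key (xs.filter pvCond) pvKeyOf [] (fun _ c => fun l => l ++ [c]) d

theorem pvFill_getD (xs : List (List (String × String))) (d : PySem.Dict String (List (List (String × String)))) (k : String) :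
    (pvFill d xs).getD k [] = d.getD k [] ++ ((xs.filter pvCond).filter (fun c => pvKeyOf c == k)) := by
  rw [pvFill_eq_filter]
  have h := PySem.Dict.getD_foldl_modify_append
    ((xs.filter pvCond).map (fun c => (pvKeyOf c, c))) d k
  rw [List.foldl_map] at h
  rw [h, List.filter_map]
  simp [Function.comp_def, List.map_map]

theorem pvFilter_cond_filter (xs : List (List (String × String))) (k : String) (hk : k ≠ "") :
    (xs.filter pvCond).filter (fun c => pvKeyOf c == k) = xs.filter (fun c => pvKeyOf c == k) := by
  rw [List.filter_filter]
  refine List.filter_congr ?_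
  intro c _
  by_cases h : pvKeyOf c = k
  · simp [h, pvCond, hk]
  · simp [h]

-- the seeded dict: every stored value is []
theorem pvSeed_getD (ks : List String) (d : PySem.Dict String (List (List (String × String))))
    (h : ∀ j, d.getD j [] = []) (k : String) :
    ((ks.foldl (fun d k => d.insert k ([] : List (List (String × String)))) d).getD k []) = [] := by
  induction ks generalizing d with
  | nil => exact h k
  | cons a ks ih =>
      refine ih _ ?_
      intro j
      rw [PySem.Dict.getD_insert]
      split <;> [rfl; exact h j]

theorem pvSet_update_of_subset (m : List String) (s : PySem.Set String) (h : ∀ x ∈ m, x ∈ s) :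
    PySem.Set.update s m = s := by
  induction m generalizing s with
  | nil => rfl
  | cons a m ih =>
      have ha : PySem.Set.add s a = s := by
        simp [PySem.Set.add, h a (by simp)]
      show PySem.Set.update (PySem.Set.add s a) m = s
      rw [ha]
      exact ih s (fun x hx => h x (by simp [hx]))

-- stable insertion commutes with filter
theorem pvInsertBy_front {α κ : Type} [LinearOrder κ] (key : α → κ) (x : α) (l : List α)
    (h : ∀ z ∈ l, key x < key z) :
    PySem.List.insertBy (fun a b => decide (key a < key b)) x l = x :: l := by
  cases l with
  | nil => rfl
  | cons z l => simp [PySem.List.insertBy, h z (by simp)]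

theorem pvFilter_insertBy {α κ : Type} [LinearOrder κ] (key : α → κ) (p : α → Bool) (x : α) (ys : List α)
    (hs : ys.Pairwise (fun a b => key a ≤ key b)) :
    (PySem.List.insertBy (fun a b => decide (key a < key b)) x ys).filter p
      = if p x then PySem.List.insertBy (fun a b => decide (key a < key b)) x (ys.filter p)
        else ys.filter p := by
  induction ys with
  | nil => by_cases hpx : p x <;> simp [PySem.List.insertBy, hpx]
  | cons y ys ih =>
      rcases List.pairwise_cons.mp hs with ⟨hy, hys⟩
      by_cases hxy : key x < key y
      · have hstep : PySem.List.insertBy (fun a b => decide (key a < key b)) x (y :: ys) = x :: y :: ys := by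
          simp [PySem.List.insertBy, hxy]
        rw [hstep]
        by_cases hpx : p x
        · have : ∀ z ∈ (y :: ys).filter p, key x < key z := by
            intro z hz
            have hz' : z ∈ y :: ys := List.mem_of_mem_filter hz
            rcases List.mem_cons.mp hz' with rfl | hz''
            · exact hxy
            · exact lt_of_lt_of_le hxy (hy z hz'')
          rw [List.filter_cons_of_pos (by simpa using hpx), if_pos hpx, pvInsertBy_front key x _ this]
        · simp [hpx, List.filter_cons]
      · have hstep : PySem.List.insertBy (fun a b => decide (key a < key b)) x (y :: ys)
            = y :: PySem.List.insertBy (fun a b => decide (key a < key b)) x ys := by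
          simp [PySem.List.insertBy, hxy]
        rw [hstep]
        by_cases hpy : p y
        · rw [List.filter_cons_of_pos (by simpa using hpy), ih hys,
            List.filter_cons_of_pos (by simpa using hpy)]
          by_cases hpx : p x
          · simp only [if_pos hpx]
            simp [PySem.List.insertBy, hxy]
          · simp [hpx]
        · rw [List.filter_cons_of_neg (by simpa using hpy), ih hys,
            List.filter_cons_of_neg (by simpa using hpy)]

theorem pvFilter_foldl_insertBy {α κ : Type} [LinearOrder κ] (key : α → κ) (p : α → Bool)
    (xs : List α) (acc : List α) (hs : acc.Pairwise (fun a b => key a ≤ key b)) :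
    (xs.foldl (fun a x => PySem.List.insertBy (fun a b => decide (key a < key b)) x a) acc).filter p
      = (xs.filter p).foldl (fun a x => PySem.List.insertBy (fun a b => decide (key a < key b)) x a)
          (acc.filter p) := by
  induction xs generalizing acc with
  | nil => rfl
  | cons x xs ih =>
      rw [List.foldl_cons, ih _ (PySem.List.insertBy_pairwise_le key x acc hs),
        pvFilter_insertBy key p x acc hs, List.filter_cons]
      by_cases hpx : p x <;> simp [hpx]

theorem pvFilter_sorted {α : Type} (key : α → String) (p : α → Bool) (xs : List α) :
    (PySem.List.sorted xs key false).filter p = PySem.List.sorted (xs.filter p) key false := by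
  rw [PySem.List.sorted_eq_foldl_insertBy, PySem.List.sorted_eq_foldl_insertBy]
  exact pvFilter_foldl_insertBy key p xs [] (by simp)

def pvKs (chunks : List (List (String × String))) : List String :=
  PySem.Set.ofList ((chunks.map pvKeyOf).filter (fun k => decide (k ≠ "")))

def pvSeed (ks : List String) : PySem.Dict String (List (List (String × String))) :=
  ks.foldl (fun d k => d.insert k ([] : List (List (String × String)))) PySem.Dict.empty

-- key list bookkeeping
theorem pvKeys_eq (chunks : List (List (String × String))) :
    PySem.Set.ofList ((chunks.map pvKeyOf).filter (fun k => decide (k ≠ "")))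
      = PySem.Set.ofList ((chunks.filter pvCond).map pvKeyOf) := by
  rw [List.filter_map]
  rfl

theorem pvMem_keys_ne (chunks : List (List (String × String))) (k : String)
    (hk : k ∈ pvKs chunks) : k ≠ "" := by
  unfold pvKs at hk
  have := (PySem.Set.mem_ofList _ k).mp hk
  rcases List.mem_filter.mp this with ⟨-, h2⟩
  simpa using h2

-- ===== VERDICT (by name: the statement is the Claim_ definition above) =====
theorem chunk_maps_py_spec : Claim_equal_chunk_maps_py := by
  intro chunks _
  show chunk_maps_py chunks = chunk_maps_py_alt chunks
  have e1 : chunk_maps_py chunks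
      = ((pvFill PySem.Dict.empty chunks).items).map
          (fun p => (p.1, PySem.List.sorted p.2 pvChunkId false)) := rfl
  have e2 : chunk_maps_py_alt chunks
      = (pvFill (pvSeed (pvKs chunks)) (PySem.List.sorted chunks pvChunkId false)).items := rfl
  rw [e1, e2]
  have hkeysSeeded : (pvSeed (pvKs chunks)).keys = pvKs chunks := by
    have h1 : (pvSeed (pvKs chunks)).keys
        = PySem.Set.update PySem.Dict.empty.keys (pvKs chunks) :=
      PySem.Dict.keys_foldl_insert (pvKs chunks) (fun _ _ => []) PySem.Dict.empty
    rw [h1]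
    have h2 : (PySem.Dict.empty : PySem.Dict String (List (List (String × String)))).keys
        = ([] : List String) := rfl
    rw [h2]
    show PySem.Set.ofList (pvKs chunks) = pvKs chunks
    exact PySem.Set.ofList_ofList _
  have hkeysA : (pvFill PySem.Dict.empty chunks).keys = pvKs chunks := by
    rw [pvFill_keys]
    have h2 : (PySem.Dict.empty : PySem.Dict String (List (List (String × String)))).keys
        = ([] : List String) := rfl
    rw [h2]
    show PySem.Set.ofList ((chunks.filter pvCond).map pvKeyOf) = pvKs chunks
    exact (pvKeys_eq chunks).symm
  have hnodupA : (pvFill PySem.Dict.empty chunks).keys.Nodup := by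
    rw [hkeysA]; exact PySem.Set.nodup_ofList _
  have hkeysB : (pvFill (pvSeed (pvKs chunks)) (PySem.List.sorted chunks pvChunkId false)).keys
      = pvKs chunks := by
    rw [pvFill_keys, hkeysSeeded]
    refine pvSet_update_of_subset _ _ ?_
    intro x hx
    rcases List.mem_map.mp hx with ⟨c, hc, rfl⟩
    rcases List.mem_filter.mp hc with ⟨hc1, hc2⟩
    have hc3 : c ∈ chunks := (PySem.List.mem_sorted chunks pvChunkId false c).mp hc1
    exact (PySem.Set.mem_ofList _ _).mpr
      (List.mem_filter.mpr ⟨List.mem_map_of_mem hc3, hc2⟩)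
  have hnodupB : (pvFill (pvSeed (pvKs chunks)) (PySem.List.sorted chunks pvChunkId false)).keys.Nodup := by
    rw [hkeysB]; exact PySem.Set.nodup_ofList _
  rw [PySem.Dict.items_eq_map_keys _ hnodupA [], PySem.Dict.items_eq_map_keys _ hnodupB []]
  rw [hkeysA, hkeysB, List.map_map]
  refine List.map_congr_left ?_
  intro k hk
  have hkne : k ≠ "" := pvMem_keys_ne chunks k hk
  simp only [Function.comp_def]
  refine Prod.ext rfl ?_
  show PySem.List.sorted ((pvFill PySem.Dict.empty chunks).getD k []) pvChunkId false
      = (pvFill (pvSeed (pvKs chunks)) (PySem.List.sorted chunks pvChunkId false)).getD k []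
  rw [pvFill_getD, pvFill_getD]
  have hempty : (PySem.Dict.empty : PySem.Dict String (List (List (String × String)))).getD k []
      = [] := rfl
  have hseedD : (pvSeed (pvKs chunks)).getD k [] = [] :=
    pvSeed_getD (pvKs chunks) PySem.Dict.empty (fun _ => rfl) k
  rw [hempty, hseedD, List.nil_append, List.nil_append]
  rw [pvFilter_cond_filter _ _ hkne, pvFilter_cond_filter _ _ hkne]
  exact (pvFilter_sorted pvChunkId (fun c => pvKeyOf c == k) chunks).symm
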